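-- pv_equiv track=rewrite | github.com/countfuzzball/GRSOAF-RSB-FuzzballTools | unittest_rsbeditor_anim_fixed.py | mip_payload_size
-- ===== SOURCE A (Python) =====
-- BYTES_PER_PIXEL = 4
--
-- def mip_payload_size(width: int, height: int, count: int) -> int:
--     total = 0
--     w, h = width, height
--
--     for _ in range(count):
--         w = max(1, w // 2)
--         h = max(1, h // 2)
--         total += w * h * BYTES_PER_PIXEL
--
--     return total
-- ===== SOURCE B (Python) =====
-- BYTES_PER_PIXEL = 4
--
-- def mip_payload_size(width: int, height: int, count: int) -> int:
--     # Once both dims have collapsed to 1x1 every further level costs a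
--     # constant BYTES_PER_PIXEL, so stop halving there and add the tail in O(1).
--     total = 0
--     w, h = width, height
--     n = count
--     while n > 0 and (w > 1 or h > 1):
--         w = max(1, w // 2)
--         h = max(1, h // 2)
--         total += w * h * BYTES_PER_PIXEL
--         n -= 1
--     if n > 0:
--         total += BYTES_PER_PIXEL * n
--     return total
-- ===== Notes on version B (the rewrite author's own statement) =====
-- stated objective: faster
-- what changed: B halves only while a dimension exceeds 1 (O(log max(w,h)) iterations) and adds the remaining 1x1 levels as a closed-form 4*n tail, instead of looping count times.
import Mathlib
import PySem

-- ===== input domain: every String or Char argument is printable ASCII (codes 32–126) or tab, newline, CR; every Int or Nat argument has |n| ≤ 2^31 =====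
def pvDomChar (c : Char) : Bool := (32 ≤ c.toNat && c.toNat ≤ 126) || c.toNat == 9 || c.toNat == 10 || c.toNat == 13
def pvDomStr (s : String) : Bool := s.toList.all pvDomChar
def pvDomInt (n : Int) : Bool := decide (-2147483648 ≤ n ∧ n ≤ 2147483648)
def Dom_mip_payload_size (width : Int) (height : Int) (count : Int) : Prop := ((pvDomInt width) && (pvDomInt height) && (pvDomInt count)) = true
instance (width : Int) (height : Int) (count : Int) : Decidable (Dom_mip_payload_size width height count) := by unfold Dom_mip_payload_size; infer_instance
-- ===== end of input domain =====

-- B halves only while a dimension exceeds 1 and adds the remaining 1x1 levels as a closed-form tail (faster; asymptotic, in a timing run).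

-- ===== PORT A =====
-- one loop step: total += w*h*4 after halving both dimensions (state = (total, w, h))
def mipStepA (st : Int × Int × Int) : Int × Int × Int :=
  let w := max 1 (PySem.Int.floordiv st.2.1 2)
  let h := max 1 (PySem.Int.floordiv st.2.2 2)
  (st.1 + w * h * 4, w, h)

def mip_payload_size (width : Int) (height : Int) (count : Int) : Int :=
  ((PySem.List.pyRange 0 count 1).foldl (fun st _ => mipStepA st) (0, width, height)).1

-- ===== PORT B =====
-- the while loop of Source B: halve while n > 0 and (w > 1 or h > 1), then add the 4*n tail
def mipLoopB (total w h n : Int) : Int :=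
  if hn : 0 < n ∧ (1 < w ∨ 1 < h) then
    let w' := max 1 (PySem.Int.floordiv w 2)
    let h' := max 1 (PySem.Int.floordiv h 2)
    mipLoopB (total + w' * h' * 4) w' h' (n - 1)
  else if 0 < n then total + 4 * n else total
termination_by n.toNat
decreasing_by omega

def mip_payload_size_alt (width : Int) (height : Int) (count : Int) : Int :=
  mipLoopB 0 width height count

-- ===== PRECONDITION & SPEC =====
def Spec_mip_payload_size (width : Int) (height : Int) (count : Int) (out : Int) : Prop := out = mip_payload_size_alt width height count
instance (width : Int) (height : Int) (count : Int) (out : Int) : Decidable (Spec_mip_payload_size width height count out) := by unfold Spec_mip_payload_size; infer_instance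

-- ===== CLAIM (what is proved, stated in full; the proofs are below) =====
def Claim_equal_mip_payload_size : Prop := ∀ (width : Int) (height : Int) (count : Int), Dom_mip_payload_size width height count → Spec_mip_payload_size width height count (mip_payload_size width height count)

-- ===== LEMMAS AND PROOFS =====

-- a fold whose body ignores the elements is an iterate of the step
theorem foldl_const_iterate {α β : Type} (g : α → α) (l : List β) (init : α) :
    l.foldl (fun st _ => g st) init = g^[l.length] init := by
  induction l generalizing init with
  | nil => rfl
  | cons x xs ih => simpa [Function.iterate_succ_apply] using ih (g init)

-- halving a dimension already at (or below) 1 yields 1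
theorem floordiv_two_le_zero {w : Int} (hw : w ≤ 1) : PySem.Int.floordiv w 2 ≤ 0 := by
  rw [PySem.Int.floordiv_eq_ediv_of_pos (by omega)]
  omega

theorem mipStepA_ones {t w h : Int} (hw : w ≤ 1) (hh : h ≤ 1) :
    mipStepA (t, w, h) = (t + 4, 1, 1) := by
  have e1 : max 1 (PySem.Int.floordiv w 2) = 1 := max_eq_left ((floordiv_two_le_zero hw).trans (by norm_num))
  have e2 : max 1 (PySem.Int.floordiv h 2) = 1 := max_eq_left ((floordiv_two_le_zero hh).trans (by norm_num))
  simp only [mipStepA, e1, e2]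
  norm_num

-- once at 1x1, k more A-steps just add 4 each
theorem iterate_ones (k : Nat) (t : Int) :
    (mipStepA^[k] (t, 1, 1)).1 = t + 4 * k := by
  induction k generalizing t with
  | zero => simp
  | succ n ih =>
      rw [Function.iterate_succ_apply, mipStepA_ones le_rfl le_rfl, ih]
      push_cast; ring

-- main invariant: B's loop equals the first projection of k iterated A-steps
theorem mipLoopB_eq_iterate (k : Nat) (t w h : Int) :
    mipLoopB t w h (k : Int) = (mipStepA^[k] (t, w, h)).1 := by
  induction k generalizing t w h with
  | zero => rw [mipLoopB]; simp
  | succ n ih =>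
      rw [mipLoopB]
      by_cases hc : 1 < w ∨ 1 < h
      · rw [dif_pos ⟨by exact_mod_cast Nat.succ_pos n, hc⟩]
        have : ((n : Int) + 1) - 1 = (n : Int) := by ring
        simp only [Nat.cast_succ, this]
        rw [ih, Function.iterate_succ_apply]
        rfl
      · rw [dif_neg (by tauto)]
        rw [not_or, not_lt, not_lt] at hc
        have hfix : mipStepA (t, w, h) = (t + 4, 1, 1) := mipStepA_ones hc.1 hc.2
        rw [if_pos (by exact_mod_cast Nat.succ_pos n),
            Function.iterate_succ_apply, hfix, iterate_ones]
        push_cast; ring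

-- ===== VERDICT (by name: the statement is the Claim_ definition above) =====
theorem mip_payload_size_spec : Claim_equal_mip_payload_size := by
  intro width height count _
  unfold Spec_mip_payload_size mip_payload_size mip_payload_size_alt
  rw [foldl_const_iterate, PySem.List.length_pyRange_one]
  by_cases hc : 0 < count
  · have h := mipLoopB_eq_iterate count.toNat 0 width height
    rw [show ((count.toNat : Nat) : Int) = count by omega] at h
    rw [sub_zero]
    exact h.symm
  · have h0 : (count - 0).toNat = 0 := by omega
    rw [h0, mipLoopB]
    simp [show ¬ (0 < count ∧ (1 < width ∨ 1 < height)) by tauto,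
          if_neg hc]
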